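-- pv_equiv track=rewrite | github.com/previarena/juego-palindrome | palindrome.py | defineTurnos
-- ===== SOURCE A (Python) =====
-- def defineTurnos(cadena):
--   PA = ""
--   PO = ""
--   i = 0
--   for x in cadena:
--     if(i%2 == 0):
--       PA = PA+x
--     else :
--       PO = PO+x
--     i += 1
--   turnos = (PA,PO)
--   return turnos
-- ===== SOURCE B (Python) =====
-- def defineTurnos(cadena):
--   return (cadena[::2], cadena[1::2])
-- ===== Notes on version B (the rewrite author's own statement) =====
-- stated objective: idiomatic
-- what changed: Replaces the single loop with an index counter, parity test and two string accumulators by two strided slices cadena[::2] and cadena[1::2].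
import Mathlib
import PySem

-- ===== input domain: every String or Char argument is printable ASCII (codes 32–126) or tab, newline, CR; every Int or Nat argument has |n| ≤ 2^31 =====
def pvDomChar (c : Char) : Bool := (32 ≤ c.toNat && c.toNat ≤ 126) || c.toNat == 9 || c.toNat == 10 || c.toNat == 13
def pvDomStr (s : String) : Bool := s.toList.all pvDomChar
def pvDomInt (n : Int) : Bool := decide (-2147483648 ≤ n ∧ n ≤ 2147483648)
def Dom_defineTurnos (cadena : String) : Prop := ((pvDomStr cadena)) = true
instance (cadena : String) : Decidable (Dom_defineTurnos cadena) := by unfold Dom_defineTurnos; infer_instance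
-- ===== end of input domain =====

-- B replaces A's one counting loop with two parity accumulators by two strided slices (idiomatic; same result).

-- ===== PORT A =====
-- the for-loop of A: carries (PA, PO, i) through the characters of cadena
def defineTurnosLoop (xs : List Char) (PA PO : String) (i : Int) : String × String :=
  match xs with
  | [] => (PA, PO)
  | x :: rest =>
    if i % 2 == 0 then defineTurnosLoop rest (PA.push x) PO (i + 1)
    else defineTurnosLoop rest PA (PO.push x) (i + 1)

def defineTurnos (cadena : String) : String × String :=
  defineTurnosLoop cadena.toList "" "" 0

-- ===== PORT B =====
-- cadena[::2] as a step-2 slice (PySem has no step slice; exact hand port of CPython's stride-2 slicing)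
def stride2 : List Char → List Char
  | [] => []
  | [x] => [x]
  | x :: _ :: rest => x :: stride2 rest

def defineTurnos_alt (cadena : String) : String × String :=
  (String.ofList (stride2 cadena.toList), String.ofList (stride2 cadena.toList.tail))

-- ===== PRECONDITION & SPEC =====
def Spec_defineTurnos (cadena : String) (out : String × String) : Prop := out = defineTurnos_alt cadena
instance (cadena : String) (out : String × String) : Decidable (Spec_defineTurnos cadena out) := by unfold Spec_defineTurnos; infer_instance

-- ===== CLAIM (what is proved, stated in full; the proofs are below) =====
def Claim_equal_defineTurnos : Prop := ∀ (cadena : String), Dom_defineTurnos cadena → Spec_defineTurnos cadena (defineTurnos cadena)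

-- ===== LEMMAS AND PROOFS =====
theorem stride2_cons (y : Char) (rest : List Char) :
    stride2 (y :: rest) = y :: stride2 rest.tail := by
  cases rest <;> simp [stride2]

theorem defineTurnosLoop_even (xs : List Char) (PA PO : String) (i : Int) (h : i % 2 = 0) :
    defineTurnosLoop xs PA PO i =
      (PA ++ String.ofList (stride2 xs), PO ++ String.ofList (stride2 xs.tail)) := by
  induction xs using stride2.induct generalizing PA PO i with
  | case1 =>
    simp [defineTurnosLoop, stride2]
  | case2 x =>
    simp only [defineTurnosLoop, stride2, h, beq_self_eq_true, if_true, List.tail]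
    exact Prod.ext (String.toList_injective (by simp)) (by simp)
  | case3 x y rest ih =>
    have h1 : ¬ ((i + 1) % 2 = 0) := by omega
    have h2 : (i + 2) % 2 = 0 := by omega
    simp only [defineTurnosLoop, h, beq_iff_eq, h1, if_true, if_false]
    rw [show i + 1 + 1 = i + 2 by ring, ih _ _ _ h2]
    refine Prod.ext ?_ ?_ <;>
      (apply String.toList_injective; simp [stride2, stride2_cons])

-- ===== VERDICT (by name: the statement is the Claim_ definition above) =====
theorem defineTurnos_spec : Claim_equal_defineTurnos := by
  intro cadena _
  unfold Spec_defineTurnos defineTurnos defineTurnos_alt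
  rw [defineTurnosLoop_even _ _ _ _ (by decide)]
  exact Prod.ext (String.toList_injective (by simp)) (String.toList_injective (by simp))
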